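-- pv_equiv track=rewrite | github.com/FAAQJAVED/Email-Phone-Number-Enrichment-Tool | core/email_utils.py | best_email
-- ===== SOURCE A (Python) =====
-- from typing import List, Set
--
-- def score_email(email: str, cfg: dict) -> int:
--     """
--     Score an email address by contact quality. **Lower score = better.**
--
--     Score   Meaning
--     -----   -------
--       1     Personal name address  (e.g. john.smith@company.com)  — most valuable
--       2     High-priority generic  (info@, hello@, contact@, enquiries@, enquiry@)
--       3     Other generic          (support@, accounts@, sales@, manager@, …)
--     999     Junk / skip-list       — filtered out entirely
--
--     Junk detection:
--       - Local part contains any ``skip_email_keywords`` entry.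
--       - Domain contains any ``junk_email_domains`` entry.
--
--     Parameters
--     ----------
--     email : Email address to score.
--     cfg   : Config dict (keys: skip_email_keywords, generic_email_keywords,
--             junk_email_domains).
--
--     Returns
--     -------
--     Integer score (1, 2, 3, or 999).
--     """
--     if not email or "@" not in email:
--         return 999
--
--     parts  = email.lower().split("@", 1)
--     local  = parts[0]
--     domain = parts[1]
--
--     skip_kws     = set(cfg.get("skip_email_keywords",   []))
--     generic_kws  = set(cfg.get("generic_email_keywords", []))
--     junk_domains = set(cfg.get("junk_email_domains",     []))
--
--     if any(k in local  for k in skip_kws):     return 999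
--     if any(j in domain for j in junk_domains): return 999
--     if not any(k in local for k in generic_kws): return 1   # personal name
--     if local in {"info", "hello", "contact", "enquiries", "enquiry"}: return 2
--     return 3
--
-- def best_email(emails: List[str], cfg: dict) -> str:
--     """
--     Return the single highest-quality email from a list.
--
--     Emails scored 999 (junk/skip) are excluded entirely.
--     Among the remaining candidates the one with the lowest score is returned.
--     Ties are broken arbitrarily (first encountered after sorting by score).
--
--     Returns ``""`` if the list is empty or all candidates are junk.
--     """
--     scored = [
--         (e.lower().strip(), score_email(e, cfg))
--         for e in emails
--         if e and "@" in e
--     ]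
--     valid = [(e, s) for e, s in scored if s < 999]
--     if not valid:
--         return ""
--     return min(valid, key=lambda x: x[1])[0]
-- ===== SOURCE B (Python) =====
-- from typing import List
--
-- def score_email(email: str, cfg: dict) -> int:
--     if not email or "@" not in email:
--         return 999
--     parts  = email.lower().split("@", 1)
--     local  = parts[0]
--     domain = parts[1]
--     skip_kws     = set(cfg.get("skip_email_keywords",   []))
--     generic_kws  = set(cfg.get("generic_email_keywords", []))
--     junk_domains = set(cfg.get("junk_email_domains",     []))
--     if any(k in local  for k in skip_kws):     return 999
--     if any(j in domain for j in junk_domains): return 999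
--     if not any(k in local for k in generic_kws): return 1
--     if local in {"info", "hello", "contact", "enquiries", "enquiry"}: return 2
--     return 3
--
-- def best_email(emails: List[str], cfg: dict) -> str:
--     # Staged scans: for each target score in ascending order, rescan the list
--     # and return the first email scoring exactly that target.  No scored list,
--     # no min, no aggregation structure at all.
--     for target in (1, 2, 3):
--         for e in emails:
--             if e and "@" in e and score_email(e, cfg) == target:
--                 return e.lower().strip()
--     return ""
-- ===== Notes on version B (the rewrite author's own statement) =====
-- stated objective: alternative
-- what changed: Replaces the build-scored-list / filter / min(key=...) pipeline by staged scans: for each target score 1,2,3 in ascending order, rescan the raw email list and return the first email scoring exactly that target, with an early return and no intermediate scored list or min at all.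
import Mathlib
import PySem

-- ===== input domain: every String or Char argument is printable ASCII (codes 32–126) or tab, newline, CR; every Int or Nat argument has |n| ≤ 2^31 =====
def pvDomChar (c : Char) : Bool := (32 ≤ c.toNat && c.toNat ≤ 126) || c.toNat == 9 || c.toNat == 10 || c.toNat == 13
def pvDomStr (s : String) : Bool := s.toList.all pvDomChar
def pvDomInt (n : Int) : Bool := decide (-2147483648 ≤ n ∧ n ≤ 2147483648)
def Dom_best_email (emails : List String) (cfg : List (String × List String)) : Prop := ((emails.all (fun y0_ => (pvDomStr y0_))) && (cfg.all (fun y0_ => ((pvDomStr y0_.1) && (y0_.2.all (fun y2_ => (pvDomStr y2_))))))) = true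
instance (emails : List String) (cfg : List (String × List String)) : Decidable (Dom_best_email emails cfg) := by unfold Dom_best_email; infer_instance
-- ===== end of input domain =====

-- B replaces A's score-everything / filter / min pipeline by staged scans over the raw
-- list, one per ascending target score 1, 2, 3, returning the first hit (alternative; same cost).

-- ===== PORT A =====
-- shared same-module helper score_email (used verbatim by both Pythons)
def score_email (email : String) (cfg : List (String × List String)) : Int :=
  if email == "" || !(PySem.Str.isIn "@" email) then 999
  else
    let parts := (PySem.Str.splitMax? (PySem.Str.lower email) "@" 1).getD []
    let loc := PySem.List.pyGetD parts 0 ""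
    let dom := PySem.List.pyGetD parts 1 ""
    let skip_kws : PySem.Set String := PySem.Set.ofList (PySem.Dict.getD (PySem.Dict.mk cfg) "skip_email_keywords" [])
    let generic_kws : PySem.Set String := PySem.Set.ofList (PySem.Dict.getD (PySem.Dict.mk cfg) "generic_email_keywords" [])
    let junk_domains : PySem.Set String := PySem.Set.ofList (PySem.Dict.getD (PySem.Dict.mk cfg) "junk_email_domains" [])
    if skip_kws.any (fun k => PySem.Str.isIn k loc) then 999
    else if junk_domains.any (fun j => PySem.Str.isIn j dom) then 999
    else if !(generic_kws.any (fun k => PySem.Str.isIn k loc)) then 1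
    else if ["info", "hello", "contact", "enquiries", "enquiry"].contains loc then 2
    else 3

def best_email (emails : List String) (cfg : List (String × List String)) : String :=
  let scored := (emails.filter (fun e => !(e == "") && PySem.Str.isIn "@" e)).map
    (fun e => (PySem.Str.strip (PySem.Str.lower e), score_email e cfg))
  let valid := scored.filter (fun p => decide (p.2 < 999))
  if valid = [] then ""
  else ((PySem.List.min? valid (fun p => p.2)).map Prod.fst).getD ""

-- ===== PORT B =====
-- inner loop 'for e in emails: if e and "@" in e and score == target: return …' = find?
def best_email_alt (emails : List String) (cfg : List (String × List String)) : String :=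
  match emails.find? (fun e => (!(e == "") && PySem.Str.isIn "@" e) && (score_email e cfg == 1)) with
  | some e => PySem.Str.strip (PySem.Str.lower e)
  | none =>
    match emails.find? (fun e => (!(e == "") && PySem.Str.isIn "@" e) && (score_email e cfg == 2)) with
    | some e => PySem.Str.strip (PySem.Str.lower e)
    | none =>
      match emails.find? (fun e => (!(e == "") && PySem.Str.isIn "@" e) && (score_email e cfg == 3)) with
      | some e => PySem.Str.strip (PySem.Str.lower e)
      | none => ""

-- ===== PRECONDITION & SPEC =====
def Spec_best_email (emails : List String) (cfg : List (String × List String)) (out : String) : Prop := out = best_email_alt emails cfg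
instance (emails : List String) (cfg : List (String × List String)) (out : String) : Decidable (Spec_best_email emails cfg out) := by unfold Spec_best_email; infer_instance

-- ===== CLAIM (what is proved, stated in full; the proofs are below) =====
def Claim_equal_best_email : Prop := ∀ (emails : List String) (cfg : List (String × List String)), Dom_best_email emails cfg → Spec_best_email emails cfg (best_email emails cfg)

-- ===== LEMMAS AND PROOFS =====

-- score_email takes only the values 1, 2, 3, 999
theorem score_email_cases (email : String) (cfg : List (String × List String)) :
    score_email email cfg = 1 ∨ score_email email cfg = 2 ∨ score_email email cfg = 3 ∨
    score_email email cfg = 999 := by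
  simp only [score_email]
  split_ifs <;> simp

-- the accumulator-generalized unfolding of PySem.List.min? (Int key)
theorem min?_foldl_some {α : Type} (t : List α) (key : α → Int) (m : α) :
    t.foldl (fun acc x => match acc with
      | none => some x
      | some m => if key x < key m then some x else some m) (some m) =
    (PySem.List.min? t key).elim (some m)
      (fun m' => if key m' < key m then some m' else some m) := by
  induction t generalizing m with
  | nil => rfl
  | cons x t ih =>
    have hx : PySem.List.min? (x :: t) key =
        t.foldl (fun acc y => match acc with
          | none => some y
          | some mm => if key y < key mm then some y else some mm) (some x) := rfl
    simp only [List.foldl_cons, hx]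
    by_cases hxm : key x < key m
    · rw [if_pos hxm, ih x]
      cases h : PySem.List.min? t key with
      | none => simp only [Option.elim]; rw [if_pos hxm]
      | some m' =>
        simp only [Option.elim]
        by_cases h1 : key m' < key x
        · rw [if_pos h1]
          show some m' = if key m' < key m then some m' else some m
          rw [if_pos (by omega)]
        · rw [if_neg h1]
          show some x = if key x < key m then some x else some m
          rw [if_pos hxm]
    · rw [if_neg hxm, ih m, ih x]
      cases h : PySem.List.min? t key with
      | none => simp only [Option.elim]; rw [if_neg hxm]
      | some m' =>
        simp only [Option.elim]
        by_cases h1 : key m' < key x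
        · rw [if_pos h1]
        · rw [if_neg h1]
          rw [if_neg (show ¬ key m' < key m by omega)]
          show some m = if key x < key m then some x else some m
          rw [if_neg hxm]

theorem min?_cons {α : Type} (p : α) (t : List α) (key : α → Int) :
    PySem.List.min? (p :: t) key =
    (PySem.List.min? t key).elim (some p)
      (fun m => if key m < key p then some m else some p) := by
  have h0 : PySem.List.min? (p :: t) key =
      t.foldl (fun acc x => match acc with
        | none => some x
        | some m => if key x < key m then some x else some m) (some p) := rfl
  rw [h0, min?_foldl_some]

-- min? over pairs with scores in {1,2,3} is the find?-chain over scores 1, 2, 3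
theorem min?_eq_find_chain (V : List (String × Int))
    (h : ∀ p ∈ V, p.2 = 1 ∨ p.2 = 2 ∨ p.2 = 3) :
    PySem.List.min? V (fun p => p.2) =
    ((V.find? (fun p => p.2 == 1)).orElse
      (fun _ => (V.find? (fun p => p.2 == 2)).orElse
        (fun _ => V.find? (fun p => p.2 == 3)))) := by
  induction V with
  | nil => rfl
  | cons p t ih =>
    have hp := h p (List.mem_cons_self ..)
    have ht : ∀ q ∈ t, q.2 = 1 ∨ q.2 = 2 ∨ q.2 = 3 := fun q hq => h q (List.mem_cons_of_mem _ hq)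
    specialize ih ht
    rw [min?_cons]
    cases hm : PySem.List.min? t (fun p => p.2) with
    | none =>
      have htnil : t = [] := (PySem.List.min?_eq_none_iff t _).mp hm
      subst htnil
      simp only [Option.elim]
      rcases hp with h1 | h1 | h1 <;> simp [List.find?, h1, Option.orElse]
    | some m =>
      rw [hm] at ih
      simp only [Option.elim]
      rcases hp with h1 | h1 | h1
      · -- p.2 = 1
        have hmm : m ∈ t := PySem.List.min?_mem hm
        have hms := ht m hmm
        rw [if_neg (show ¬ m.2 < p.2 by omega)]
        have hfp : (fun q : String × Int => q.2 == 1) p = true := by simp [h1]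
        rw [List.find?_cons_of_pos (p := fun q : String × Int => q.2 == 1) (a := p) (l := t) hfp]
        simp [Option.orElse]
      · -- p.2 = 2
        cases hf1 : t.find? (fun q => q.2 == 1) with
        | some q =>
          rw [hf1] at ih
          simp only [Option.orElse] at ih
          have hq1 : q.2 = 1 := by simpa using List.find?_some hf1
          injection ih with ih'
          subst ih'
          rw [if_pos (by omega)]
          have hfp : (fun q : String × Int => q.2 == 1) p = false := by simp [h1]
          rw [List.find?_cons_of_neg (p := fun q : String × Int => q.2 == 1) (a := p) (l := t) (by simp only [hfp]; exact Bool.false_ne_true), hf1]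
          simp [Option.orElse]
        | none =>
          have hm1 : m.2 ≠ 1 := by
            have hmm : m ∈ t := PySem.List.min?_mem hm
            have := List.find?_eq_none.mp hf1 m hmm
            simpa using this
          have hmm : m ∈ t := PySem.List.min?_mem hm
          have hms := ht m hmm
          rw [if_neg (show ¬ m.2 < p.2 by omega)]
          have hfp1 : (fun q : String × Int => q.2 == 1) p = false := by simp [h1]
          have hfp2 : (fun q : String × Int => q.2 == 2) p = true := by simp [h1]
          rw [List.find?_cons_of_neg (p := fun q : String × Int => q.2 == 1) (a := p) (l := t) (by simp only [hfp1]; exact Bool.false_ne_true), hf1, List.find?_cons_of_pos (p := fun q : String × Int => q.2 == 2) (a := p) (l := t) hfp2]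
          simp [Option.orElse]
      · -- p.2 = 3
        cases hf1 : t.find? (fun q => q.2 == 1) with
        | some q =>
          rw [hf1] at ih
          simp only [Option.orElse] at ih
          have hq1 : q.2 = 1 := by simpa using List.find?_some hf1
          injection ih with ih'
          subst ih'
          rw [if_pos (by omega)]
          have hfp : (fun q : String × Int => q.2 == 1) p = false := by simp [h1]
          rw [List.find?_cons_of_neg (p := fun q : String × Int => q.2 == 1) (a := p) (l := t) (by simp only [hfp]; exact Bool.false_ne_true), hf1]
          simp [Option.orElse]
        | none =>
          rw [hf1] at ih
          simp only [Option.orElse] at ih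
          cases hf2 : t.find? (fun q => q.2 == 2) with
          | some q =>
            rw [hf2] at ih
            have hq2 : q.2 = 2 := by simpa using List.find?_some hf2
            injection ih with ih'
            subst ih'
            rw [if_pos (by omega)]
            have hfp1 : (fun q : String × Int => q.2 == 1) p = false := by simp [h1]
            have hfp2 : (fun q : String × Int => q.2 == 2) p = false := by simp [h1]
            rw [List.find?_cons_of_neg (p := fun q : String × Int => q.2 == 1) (a := p) (l := t) (by simp only [hfp1]; exact Bool.false_ne_true), hf1,
              List.find?_cons_of_neg (p := fun q : String × Int => q.2 == 2) (a := p) (l := t) (by simp only [hfp2]; exact Bool.false_ne_true), hf2]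
            simp [Option.orElse]
          | none =>
            rw [hf2] at ih
            have hm3 : m.2 = 3 := by
              have := List.find?_some ih.symm
              simpa using this
            rw [if_neg (by omega)]
            have hfp1 : (fun q : String × Int => q.2 == 1) p = false := by simp [h1]
            have hfp2 : (fun q : String × Int => q.2 == 2) p = false := by simp [h1]
            have hfp3 : (fun q : String × Int => q.2 == 3) p = true := by simp [h1]
            rw [List.find?_cons_of_neg (p := fun q : String × Int => q.2 == 1) (a := p) (l := t) (by simp only [hfp1]; exact Bool.false_ne_true), hf1,
              List.find?_cons_of_neg (p := fun q : String × Int => q.2 == 2) (a := p) (l := t) (by simp only [hfp2]; exact Bool.false_ne_true), hf2,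
              List.find?_cons_of_pos (p := fun q : String × Int => q.2 == 3) (a := p) (l := t) hfp3]
            simp [Option.orElse]

-- find? over A's filtered/mapped/filtered pair list = find? over the raw email list (s < 999)
theorem find_scan (l : List String) (cfg : List (String × List String)) (s : Int)
    (hs : s < 999) :
    (((((l.filter (fun e => !(e == "") && PySem.Str.isIn "@" e)).map
        (fun e => (PySem.Str.strip (PySem.Str.lower e), score_email e cfg))).filter
        (fun p => decide (p.2 < 999))).find? (fun p => p.2 == s)).map Prod.fst)
    = (l.find? (fun e => (!(e == "") && PySem.Str.isIn "@" e) && (score_email e cfg == s))).map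
        (fun e => PySem.Str.strip (PySem.Str.lower e)) := by
  induction l with
  | nil => rfl
  | cons e t ih =>
    by_cases hk : ((!(e == "") && PySem.Str.isIn "@" e) = true)
    · rw [List.filter_cons_of_pos (p := fun e : String => !(e == "") && PySem.Str.isIn "@" e) hk,
        List.map_cons]
      by_cases hes : score_email e cfg = s
      · have hkeep : (fun p : String × Int => decide (p.2 < 999))
            ((PySem.Str.strip (PySem.Str.lower e), score_email e cfg)) = true := by
          simp [hes]; omega
        rw [List.filter_cons_of_pos (p := fun p : String × Int => decide (p.2 < 999)) hkeep]
        rw [List.find?_cons_of_pos (p := fun p : String × Int => p.2 == s) (by simp [hes]),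
          List.find?_cons_of_pos (p := fun e : String => (!(e == "") && PySem.Str.isIn "@" e) && (score_email e cfg == s))
            (by
              have hk' := hk
              simp only [Bool.and_eq_true] at hk' ⊢
              exact ⟨hk', by simp [hes]⟩)]
        rfl
      · rw [List.find?_cons_of_neg (p := fun e : String => (!(e == "") && PySem.Str.isIn "@" e) && (score_email e cfg == s)) (by simp [hes])]
        by_cases h9 : score_email e cfg < 999
        · have hkeep : (fun p : String × Int => decide (p.2 < 999))
              ((PySem.Str.strip (PySem.Str.lower e), score_email e cfg)) = true := by simpa using h9
          rw [List.filter_cons_of_pos (p := fun p : String × Int => decide (p.2 < 999)) hkeep,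
            List.find?_cons_of_neg (p := fun p : String × Int => p.2 == s) (by simp [hes])]
          exact ih
        · have hdrop : (fun p : String × Int => decide (p.2 < 999))
              ((PySem.Str.strip (PySem.Str.lower e), score_email e cfg)) = false := by simpa using h9
          rw [List.filter_cons_of_neg (p := fun p : String × Int => decide (p.2 < 999)) (by simp only [hdrop]; exact Bool.false_ne_true)]
          exact ih
    · rw [List.filter_cons_of_neg (p := fun e : String => !(e == "") && PySem.Str.isIn "@" e) hk,
        List.find?_cons_of_neg (p := fun e : String => (!(e == "") && PySem.Str.isIn "@" e) && (score_email e cfg == s))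
          (by simp only [Bool.and_eq_true]; intro hc; exact hk ((Bool.and_eq_true _ _).mpr hc.1))]
      exact ih

-- ===== VERDICT (by name: the statement is the Claim_ definition above) =====
theorem best_email_spec : Claim_equal_best_email := by
  unfold Claim_equal_best_email Spec_best_email
  intro emails cfg _
  simp only [best_email, best_email_alt]
  set V := (((emails.filter (fun e => !(e == "") && PySem.Str.isIn "@" e)).map
      (fun e => (PySem.Str.strip (PySem.Str.lower e), score_email e cfg))).filter
      (fun p => decide (p.2 < 999))) with hVdef
  have hV : ∀ p ∈ V, p.2 = 1 ∨ p.2 = 2 ∨ p.2 = 3 := by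
    intro p hp
    rw [hVdef] at hp
    obtain ⟨hp1, hp2⟩ := List.mem_filter.mp hp
    obtain ⟨e, he, rfl⟩ := List.mem_map.mp hp1
    have hlt : score_email e cfg < 999 := by simpa using hp2
    have hc := score_email_cases e cfg
    dsimp only
    omega
  have hs1 := find_scan emails cfg 1 (by omega)
  have hs2 := find_scan emails cfg 2 (by omega)
  have hs3 := find_scan emails cfg 3 (by omega)
  rw [← hVdef] at hs1 hs2 hs3
  by_cases hnil : V = []
  · rw [if_pos hnil]
    rw [hnil] at hs1 hs2 hs3
    simp only [List.find?_nil, Option.map_none] at hs1 hs2 hs3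
    have hg1 : emails.find? (fun e => (!(e == "") && PySem.Str.isIn "@" e) && (score_email e cfg == 1)) = none := by
      cases hg : emails.find? (fun e => (!(e == "") && PySem.Str.isIn "@" e) && (score_email e cfg == 1)) with
      | none => rfl
      | some q => rw [hg] at hs1; simp at hs1
    have hg2 : emails.find? (fun e => (!(e == "") && PySem.Str.isIn "@" e) && (score_email e cfg == 2)) = none := by
      cases hg : emails.find? (fun e => (!(e == "") && PySem.Str.isIn "@" e) && (score_email e cfg == 2)) with
      | none => rfl
      | some q => rw [hg] at hs2; simp at hs2
    have hg3 : emails.find? (fun e => (!(e == "") && PySem.Str.isIn "@" e) && (score_email e cfg == 3)) = none := by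
      cases hg : emails.find? (fun e => (!(e == "") && PySem.Str.isIn "@" e) && (score_email e cfg == 3)) with
      | none => rfl
      | some q => rw [hg] at hs3; simp at hs3
    rw [hg1, hg2, hg3]
  · rw [if_neg hnil, min?_eq_find_chain V hV]
    cases hf1 : V.find? (fun p => p.2 == 1) with
    | some q1 =>
      rw [hf1] at hs1
      cases hg1 : emails.find? (fun e => (!(e == "") && PySem.Str.isIn "@" e) && (score_email e cfg == 1)) with
      | none => rw [hg1] at hs1; simp at hs1
      | some e1 =>
        rw [hg1] at hs1
        simp only [Option.map_some, Option.some.injEq] at hs1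
        simp [Option.orElse, hs1]
    | none =>
      rw [hf1] at hs1
      simp only [Option.map_none] at hs1
      have hg1 : emails.find? (fun e => (!(e == "") && PySem.Str.isIn "@" e) && (score_email e cfg == 1)) = none := by
        cases hg : emails.find? (fun e => (!(e == "") && PySem.Str.isIn "@" e) && (score_email e cfg == 1)) with
        | none => rfl
        | some q => rw [hg] at hs1; simp at hs1
      rw [hg1]
      cases hf2 : V.find? (fun p => p.2 == 2) with
      | some q2 =>
        rw [hf2] at hs2
        cases hg2 : emails.find? (fun e => (!(e == "") && PySem.Str.isIn "@" e) && (score_email e cfg == 2)) with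
        | none => rw [hg2] at hs2; simp at hs2
        | some e2 =>
          rw [hg2] at hs2
          simp only [Option.map_some, Option.some.injEq] at hs2
          simp [Option.orElse, hs2]
      | none =>
        rw [hf2] at hs2
        simp only [Option.map_none] at hs2
        have hg2 : emails.find? (fun e => (!(e == "") && PySem.Str.isIn "@" e) && (score_email e cfg == 2)) = none := by
          cases hg : emails.find? (fun e => (!(e == "") && PySem.Str.isIn "@" e) && (score_email e cfg == 2)) with
          | none => rfl
          | some q => rw [hg] at hs2; simp at hs2
        rw [hg2]
        cases hf3 : V.find? (fun p => p.2 == 3) with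
        | some q3 =>
          rw [hf3] at hs3
          cases hg3 : emails.find? (fun e => (!(e == "") && PySem.Str.isIn "@" e) && (score_email e cfg == 3)) with
          | none => rw [hg3] at hs3; simp at hs3
          | some e3 =>
            rw [hg3] at hs3
            simp only [Option.map_some, Option.some.injEq] at hs3
            simp [Option.orElse, hs3]
        | none =>
          -- V nonempty but no score 1,2,3 found: contradiction with hV
          exfalso
          obtain ⟨p, hp⟩ := List.exists_mem_of_ne_nil V hnil
          rcases hV p hp with h1 | h1 | h1
          · have := List.find?_eq_none.mp hf1 p hp; simp [h1] at this
          · have := List.find?_eq_none.mp hf2 p hp; simp [h1] at this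
          · have := List.find?_eq_none.mp hf3 p hp; simp [h1] at this
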